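-- pv_equiv track=rewrite | github.com/Air2air/northworks | data-normalization-utility.py | _get_items_key
-- ===== SOURCE A (Python) =====
-- from typing import Dict, List, Any, Optional
--
-- def _get_items_key(data: Dict[str, Any], file_type: str) -> str:
--     """Get the key containing the items array"""
--     if 'interviews' in data:
--         return 'interviews'
--     elif 'articles' in data:
--         return 'articles'
--     elif 'reviews' in data:
--         return 'reviews'
--     elif 'professional' in data:
--         return 'professional'
--     elif 'publications' in data:
--         return 'publications'
--     elif 'background' in data:
--         return 'background'
--     elif 'items' in data:
--         return 'items'
--     else:
--         # Default to first array found
--         for key, value in data.items():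
--             if isinstance(value, list) and key != 'metadata':
--                 return key
--         return 'items'
-- ===== SOURCE B (Python) =====
-- # B: single pass with accumulators (min-rank special key + first fallback)
-- # instead of A's up-to-seven membership scans followed by a fallback scan.
-- _RANK = {'interviews': 0, 'articles': 1, 'reviews': 2, 'professional': 3,
--          'publications': 4, 'background': 5, 'items': 6}
--
-- def _get_items_key(data, file_type):
--     """Get the key containing the items array"""
--     best = None       # (rank, key) of the highest-priority special key seen
--     fallback = None   # first list-valued key that is not 'metadata'
--     for key, value in data.items():
--         r = _RANK.get(key)
--         if r is not None and (best is None or r < best[0]):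
--             best = (r, key)
--         if fallback is None and isinstance(value, list) and key != 'metadata':
--             fallback = key
--     if best is not None:
--         return best[1]
--     return fallback if fallback is not None else 'items'
-- ===== Notes on version B (the rewrite author's own statement) =====
-- stated objective: alternative
-- what changed: A probes the dict up to seven times with membership tests and then rescans for a fallback; B makes one pass over the items, tracking the minimum-rank special key (rank table) and the first non-metadata list-valued key in accumulators.
import Mathlib
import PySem

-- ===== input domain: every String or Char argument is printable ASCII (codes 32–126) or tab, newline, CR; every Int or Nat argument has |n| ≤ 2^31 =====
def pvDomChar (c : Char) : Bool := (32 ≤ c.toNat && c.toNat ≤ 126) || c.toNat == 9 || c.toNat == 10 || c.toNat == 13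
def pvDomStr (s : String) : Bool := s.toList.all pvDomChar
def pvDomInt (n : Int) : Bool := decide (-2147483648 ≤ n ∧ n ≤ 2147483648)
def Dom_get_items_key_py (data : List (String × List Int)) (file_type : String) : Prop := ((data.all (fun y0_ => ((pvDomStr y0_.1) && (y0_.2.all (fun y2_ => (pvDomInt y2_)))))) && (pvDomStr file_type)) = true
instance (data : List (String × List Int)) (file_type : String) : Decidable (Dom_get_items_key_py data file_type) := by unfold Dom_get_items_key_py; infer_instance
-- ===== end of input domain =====

-- B replaces A's repeated membership scans with one pass keeping two accumulators (objective: alternative).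

-- ===== PORT A =====
-- 'k in data' on a dict = membership among the keys
def pvHasKey (data : List (String × List Int)) (k : String) : Bool :=
  data.any (fun p => p.1 == k)

-- A's fallback loop over data.items(); values are List Int, so Python's
-- 'isinstance(value, list)' is always True under the type convention and is omitted.
def pvFallbackA : List (String × List Int) → String
  | [] => "items"
  | (k, _) :: t => if k != "metadata" then k else pvFallbackA t

def get_items_key_py (data : List (String × List Int)) (file_type : String) : String :=
  if pvHasKey data "interviews" then "interviews"
  else if pvHasKey data "articles" then "articles"
  else if pvHasKey data "reviews" then "reviews"
  else if pvHasKey data "professional" then "professional"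
  else if pvHasKey data "publications" then "publications"
  else if pvHasKey data "background" then "background"
  else if pvHasKey data "items" then "items"
  else pvFallbackA data

-- ===== PORT B =====
-- _RANK.get(key)
def pvRank (k : String) : Option Nat :=
  if k == "interviews" then some 0
  else if k == "articles" then some 1
  else if k == "reviews" then some 2
  else if k == "professional" then some 3
  else if k == "publications" then some 4
  else if k == "background" then some 5
  else if k == "items" then some 6
  else none

-- one iteration of B's loop body on the state (best, fallback)
def pvStepB (s : Option (Nat × String) × Option String) (p : String × List Int) :
    Option (Nat × String) × Option String :=
  let best :=
    match pvRank p.1 with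
    | some r =>
        match s.1 with
        | none => some (r, p.1)
        | some (b, k) => if r < b then some (r, p.1) else some (b, k)
    | none => s.1
  -- isinstance(value, list) is always True under the type convention
  let fb :=
    match s.2 with
    | some k => some k
    | none => if p.1 != "metadata" then some p.1 else none
  (best, fb)

def get_items_key_py_alt (data : List (String × List Int)) (file_type : String) : String :=
  let s := data.foldl pvStepB (none, none)
  match s.1 with
  | some (_, k) => k
  | none =>
      match s.2 with
      | some k => k
      | none => "items"

-- ===== PRECONDITION & SPEC =====
def Spec_get_items_key_py (data : List (String × List Int)) (file_type : String) (out : String) : Prop := out = get_items_key_py_alt data file_type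
instance (data : List (String × List Int)) (file_type : String) (out : String) : Decidable (Spec_get_items_key_py data file_type out) := by unfold Spec_get_items_key_py; infer_instance

-- ===== CLAIM (what is proved, stated in full; the proofs are below) =====
def Claim_equal_get_items_key_py : Prop := ∀ (data : List (String × List Int)) (file_type : String), Dom_get_items_key_py data file_type → Spec_get_items_key_py data file_type (get_items_key_py data file_type)

-- ===== LEMMAS AND PROOFS =====

-- proof-side: the two accumulator components of pvStepB, separated
def pvBStepP (a : Option (Nat × String)) (p : String × List Int) : Option (Nat × String) :=
  match pvRank p.1 with
  | some r =>
      match a with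
      | none => some (r, p.1)
      | some (b, k) => if r < b then some (r, p.1) else some (b, k)
  | none => a

def pvFStep (f : Option String) (p : String × List Int) : Option String :=
  match f with
  | some k => some k
  | none => if p.1 != "metadata" then some p.1 else none

-- best component abstracted to ranks only
def pvBStep (a : Option Nat) (r : Option Nat) : Option Nat :=
  match r with
  | none => a
  | some n =>
      match a with
      | none => some n
      | some b => if n < b then some n else some b

def pvName (n : Nat) : String :=
  match n with
  | 0 => "interviews" | 1 => "articles" | 2 => "reviews" | 3 => "professional"
  | 4 => "publications" | 5 => "background" | _ => "items"

def pvPair (n : Nat) : Nat × String := (n, pvName n)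

-- A's if/elif chain as an index
def pvAI (data : List (String × List Int)) : Option Nat :=
  if pvHasKey data "interviews" then some 0
  else if pvHasKey data "articles" then some 1
  else if pvHasKey data "reviews" then some 2
  else if pvHasKey data "professional" then some 3
  else if pvHasKey data "publications" then some 4
  else if pvHasKey data "background" then some 5
  else if pvHasKey data "items" then some 6
  else none

theorem pvRank_some (k : String) (n : Nat) (h : pvRank k = some n) :
    n ≤ 6 ∧ k = pvName n := by
  unfold pvRank at h
  split_ifs at h with h1 h2 h3 h4 h5 h6 h7 <;>
    first
      | (injection h with h; subst h; simp_all [pvName])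
      | simp at h

theorem pvRank_none (k : String) (h : pvRank k = none) :
    k ≠ "interviews" ∧ k ≠ "articles" ∧ k ≠ "reviews" ∧ k ≠ "professional" ∧
    k ≠ "publications" ∧ k ≠ "background" ∧ k ≠ "items" := by
  unfold pvRank at h
  split_ifs at h <;> simp_all

theorem pvStep_pair (data : List (String × List Int)) (b : Option (Nat × String)) (f : Option String) :
    data.foldl pvStepB (b, f) = (data.foldl pvBStepP b, data.foldl pvFStep f) := by
  induction data generalizing b f with
  | nil => rfl
  | cons p t ih => simp [List.foldl, pvStepB, pvBStepP, pvFStep, ih]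

theorem pvBStepP_rep (a : Option Nat) (p : String × List Int) :
    pvBStepP (a.map pvPair) p = (pvBStep a (pvRank p.1)).map pvPair := by
  cases h : pvRank p.1 with
  | none => simp [pvBStepP, pvBStep, h]
  | some n =>
      obtain ⟨-, hk⟩ := pvRank_some _ _ h
      cases a with
      | none => simp [pvBStepP, pvBStep, h, pvPair, ← hk]
      | some b =>
          by_cases hb : n < b <;>
            simp [pvBStepP, pvBStep, h, hb, pvPair, ← hk]

theorem pvBest_rep (data : List (String × List Int)) (a : Option Nat) :
    data.foldl pvBStepP (a.map pvPair) =
      (data.foldl (fun x p => pvBStep x (pvRank p.1)) a).map pvPair := by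
  induction data generalizing a with
  | nil => rfl
  | cons p t ih =>
      simp only [List.foldl, pvBStepP_rep, ih]

theorem pvBStep_none_left (x : Option Nat) : pvBStep none x = x := by
  cases x <;> rfl

theorem pvBStep_some (b n : Nat) : pvBStep (some b) (some n) = some (Nat.min b n) := by
  simp only [pvBStep, Nat.min_def]
  split_ifs <;> simp <;> omega

theorem pvBStep_assoc (a b c : Option Nat) :
    pvBStep (pvBStep a b) c = pvBStep a (pvBStep b c) := by
  cases a <;> cases b <;> cases c <;>
    (try simp only [pvBStep_some]) <;> (try simp [pvBStep]) <;>
      (try exact congrArg some (Nat.min_assoc _ _ _)) <;>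
      (try (split_ifs <;> simp [Nat.min_def] <;> omega))

theorem pvBfold_shift (l : List (Option Nat)) (a r : Option Nat) :
    l.foldl pvBStep (pvBStep a r) = pvBStep a (l.foldl pvBStep r) := by
  induction l generalizing r with
  | nil => rfl
  | cons x t ih => simp [List.foldl, pvBStep_assoc, ih]

theorem pvBfold_out (l : List (Option Nat)) (a : Option Nat) :
    l.foldl pvBStep a = pvBStep a (l.foldl pvBStep none) := by
  have h := pvBfold_shift l a none
  simpa [pvBStep] using h

theorem pvHasKey_cons (p : String × List Int) (t : List (String × List Int)) (k : String) :
    pvHasKey (p :: t) k = ((p.1 == k) || pvHasKey t k) := by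
  simp [pvHasKey]

-- min-rank fold equals A's chain index
theorem pvMin_eq_AI (data : List (String × List Int)) :
    (data.map (fun p => pvRank p.1)).foldl pvBStep none = pvAI data := by
  induction data with
  | nil => rfl
  | cons p t ih =>
      simp only [List.map, List.foldl]
      rw [pvBfold_out, ih]
      cases h : pvRank p.1 with
      | none =>
          obtain ⟨h1, h2, h3, h4, h5, h6, h7⟩ := pvRank_none _ h
          simp only [pvBStep_none_left]
          simp [pvAI, pvHasKey_cons, beq_iff_eq, h1, h2, h3, h4, h5, h6, h7]
      | some n =>
          obtain ⟨hn, hk⟩ := pvRank_some _ _ h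
          simp only [pvBStep_none_left]
          interval_cases n <;>
            simp only [pvAI, pvHasKey_cons, hk, pvName] <;>
            simp <;> split_ifs <;> simp [pvBStep]

theorem pvFStay (t : List (String × List Int)) (k : String) :
    t.foldl pvFStep (some k) = some k := by
  induction t with
  | nil => rfl
  | cons p u ih => simpa [List.foldl, pvFStep] using ih

theorem pvFallback_eq (data : List (String × List Int)) :
    (match data.foldl pvFStep none with
     | some k => k
     | none => "items") = pvFallbackA data := by
  induction data with
  | nil => rfl
  | cons p t ih =>
      by_cases hm : (p.1 != "metadata") = true
      · simp [List.foldl, pvFStep, hm, pvFStay, pvFallbackA]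
      · simp only [bne_iff_ne, ne_eq, not_not, Bool.not_eq_true] at hm
        simp [List.foldl, pvFStep, hm, pvFallbackA, ih]

theorem pvA_eq_AI (data : List (String × List Int)) (file_type : String) :
    get_items_key_py data file_type =
      (match pvAI data with
       | some n => pvName n
       | none => pvFallbackA data) := by
  unfold get_items_key_py pvAI
  split_ifs <;> rfl

-- ===== VERDICT (by name: the statement is the Claim_ definition above) =====
theorem get_items_key_py_spec : Claim_equal_get_items_key_py := by
  intro data file_type _
  unfold Spec_get_items_key_py get_items_key_py_alt
  rw [pvA_eq_AI]
  have h2 := pvBest_rep data none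
  rw [show (none : Option Nat).map pvPair = none from rfl] at h2
  have h1 : data.foldl (fun x p => pvBStep x (pvRank p.1)) none = pvAI data := by
    rw [← pvMin_eq_AI, List.foldl_map]
  rw [h1] at h2
  simp only [pvStep_pair data none none, h2]
  cases hAI : pvAI data with
  | some n => simp [pvPair]
  | none => simpa using (pvFallback_eq data).symm
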